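-- pv_equiv track=rewrite | github.com/ChahelPaatur/Self-Modifying-Program-Synthesis-via-Online-Library-Evolution | common/ultra_ops.py | detect_vertical_lines
-- ===== SOURCE A (Python) =====
-- from typing import List, Dict, Tuple, Set
--
-- Grid = List[List[int]]
--
-- def detect_vertical_lines(grid: Grid, min_length: int = 3) -> Grid:
--     """Detect vertical lines"""
--     if not grid:
--         return grid
--
--     h, w = len(grid), len(grid[0])
--     result = [[0] * w for _ in range(h)]
--
--     for c in range(w):
--         streak = 1
--         prev_color = grid[0][c]
--         for r in range(1, h):
--             if grid[r][c] == prev_color and prev_color != 0: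
--                 streak += 1
--             else:
--                 if streak >= min_length:
--                     for i in range(r - streak, r):
--                         result[i][c] = prev_color
--                 streak = 1
--                 prev_color = grid[r][c]
--         if streak >= min_length:
--             for i in range(h - streak, h):
--                 result[i][c] = prev_color
--
--     return result
-- ===== SOURCE B (Python) =====
-- from typing import List
--
-- Grid = List[List[int]]
--
-- def _runs(xs):
--     """Maximal constant runs of xs as (value, length) pairs (two-pointer scan)."""
--     runs = []
--     i = 0
--     while i < len(xs):
--         j = i + 1
--         while j < len(xs) and xs[j] == xs[i]:
--             j += 1
--         runs.append((xs[i], j - i))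
--         i = j
--     return runs
--
-- def detect_vertical_lines(grid: Grid, min_length: int = 3) -> Grid:
--     """Detect vertical lines"""
--     if not grid:
--         return grid
--     h, w = len(grid), len(grid[0])
--     cols = []
--     for c in range(w):
--         col = [row[c] for row in grid]
--         out = []
--         for color, n in _runs(col):
--             out.extend([color] * n if color != 0 and n >= min_length else [0] * n)
--         cols.append(out)
--     return [[cols[c][r] for c in range(w)] for r in range(h)]
-- ===== Notes on version B (the rewrite author's own statement) =====
-- stated objective: alternative
-- what changed: B replaces A's incremental streak/prev_color state machine with back-fill loops into a mutable 2D result by a per-column run decomposition (collect maximal constant runs, then emit each run as its color or zeros) followed by a transpose-style reassembly.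
-- outside the precondition, e.g. on detect_vertical_lines([[1, 2], [1]], 2): A raises IndexError, B raises IndexError
import Mathlib
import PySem

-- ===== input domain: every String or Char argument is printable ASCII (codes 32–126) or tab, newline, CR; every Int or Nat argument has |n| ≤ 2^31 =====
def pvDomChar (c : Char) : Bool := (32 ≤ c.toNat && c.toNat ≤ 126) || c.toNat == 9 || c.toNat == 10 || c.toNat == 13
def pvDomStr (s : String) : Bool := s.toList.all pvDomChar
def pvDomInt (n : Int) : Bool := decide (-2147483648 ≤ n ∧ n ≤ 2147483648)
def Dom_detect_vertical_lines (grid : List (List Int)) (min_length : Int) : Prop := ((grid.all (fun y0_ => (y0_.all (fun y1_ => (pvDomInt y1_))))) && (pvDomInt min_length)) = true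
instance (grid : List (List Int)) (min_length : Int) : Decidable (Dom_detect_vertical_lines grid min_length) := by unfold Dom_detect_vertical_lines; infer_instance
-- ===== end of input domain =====

-- B re-implements the column scan as "collect maximal runs, then emit per run" plus a final
-- transpose, instead of A's incremental streak state machine back-filling a mutable 2D result;
-- objective: alternative decomposition (same asymptotic cost). Equivalence is on return values;
-- neither program mutates its argument.

-- ===== PORT A =====
-- result[i][c] = v  (both indices are in range whenever A executes this; i is nonneg, see pvFillA)
def pvSet2 (res : List (List Int)) (i : Nat) (c : Nat) (v : Int) : List (List Int) :=
  res.set i ((res.getD i []).set c v)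

-- 'for i in range(a, b): result[i][c] = v' ; in A, a = r - streak ≥ 0 always, so i.toNat is exact
def pvFillA (res : List (List Int)) (c : Nat) (a b : Int) (v : Int) : List (List Int) :=
  (PySem.List.pyRange a b 1).foldl (fun acc i => pvSet2 acc i.toNat c v) res

-- body of A's inner 'for r in range(1, h)' loop; state = (result, streak, prev_color)
def pvStepA (grid : List (List Int)) (ml : Int) (c : Nat)
    (st : List (List Int) × Int × Int) (r : Int) : List (List Int) × Int × Int :=
  let cur := (grid.getD r.toNat []).getD c 0
  if cur = st.2.2 ∧ st.2.2 ≠ 0 then (st.1, st.2.1 + 1, st.2.2)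
  else
    let res' := if ml ≤ st.2.1 then pvFillA st.1 c (r - st.2.1) r st.2.2 else st.1
    (res', 1, cur)

-- one iteration of A's outer 'for c in range(w)' loop
def pvColA (grid : List (List Int)) (ml : Int) (h : Int)
    (res : List (List Int)) (c : Nat) : List (List Int) :=
  let prev0 := (grid.headD []).getD c 0
  let st := (PySem.List.pyRange 1 h 1).foldl (pvStepA grid ml c) (res, 1, prev0)
  if ml ≤ st.2.1 then pvFillA st.1 c (h - st.2.1) h st.2.2 else st.1

def detect_vertical_lines (grid : List (List Int)) (min_length : Int) : List (List Int) :=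
  if grid = [] then grid
  else
    let h : Int := grid.length
    let w : Nat := (grid.headD []).length
    let res0 := List.replicate grid.length (List.replicate w (0 : Int))
    (PySem.List.pyRange 0 w 1).foldl (fun res c => pvColA grid min_length h res c.toNat) res0

-- ===== PORT B =====
-- _runs: each outer-while iteration scans the constant prefix starting at i (j - i =
-- 1 + takeWhile length of the tail) and continues at j; here that continuation is the
-- structural recursion on the dropped suffix, emitting the same (value, length) pairs in order
def pvRuns (xs : List Int) : List (Int × Nat) :=
  match xs with
  | [] => []
  | x :: t =>
      (x, 1 + (t.takeWhile (fun y => y == x)).length) :: pvRuns (t.dropWhile (fun y => y == x))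
termination_by xs.length
decreasing_by
  simpa using Nat.lt_succ_of_le (List.length_dropWhile_le _ _)

def pvEmit (ml : Int) (p : Int × Nat) : List Int :=
  if p.1 ≠ 0 ∧ ml ≤ (p.2 : Int) then List.replicate p.2 p.1 else List.replicate p.2 0

-- 'out = []; for color, n in _runs(col): out.extend(...)'
def pvColB (ml : Int) (col : List Int) : List Int :=
  (pvRuns col).foldl (fun out p => out ++ pvEmit ml p) []

def detect_vertical_lines_alt (grid : List (List Int)) (min_length : Int) : List (List Int) :=
  if grid = [] then grid
  else
    let h : Nat := grid.length
    let w : Nat := (grid.headD []).length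
    let cols := (List.range w).map (fun c => pvColB min_length (grid.map (fun row => row.getD c 0)))
    (List.range h).map (fun r => (List.range w).map (fun c => (cols.getD c []).getD r 0))

-- ===== PRECONDITION & SPEC =====
-- Pre_ excludes exactly the ragged grids on which Python A raises IndexError
-- (some row shorter than the first row); Python B raises there as well.
def Pre_detect_vertical_lines (grid : List (List Int)) (min_length : Int) : Prop :=
  ∀ row ∈ grid, (grid.headD []).length ≤ row.length

instance (grid : List (List Int)) (min_length : Int) : Decidable (Pre_detect_vertical_lines grid min_length) := by
  unfold Pre_detect_vertical_lines; infer_instance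

def pvWitness_detect_vertical_lines : List (List Int) × Int :=
  ([[1, 0], [1, 2], [1, 2]], 2)

def Spec_detect_vertical_lines (grid : List (List Int)) (min_length : Int) (out : List (List Int)) : Prop := out = detect_vertical_lines_alt grid min_length
instance (grid : List (List Int)) (min_length : Int) (out : List (List Int)) : Decidable (Spec_detect_vertical_lines grid min_length out) := by unfold Spec_detect_vertical_lines; infer_instance

-- ===== CLAIM (what is proved, stated in full; the proofs are below) =====
def Claim_equal_detect_vertical_lines : Prop := ∀ (grid : List (List Int)) (min_length : Int), Dom_detect_vertical_lines grid min_length → Pre_detect_vertical_lines grid min_length → Spec_detect_vertical_lines grid min_length (detect_vertical_lines grid min_length)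

-- ===== LEMMAS AND PROOFS =====

-- column extraction: pvE c res = the list [row[c] (default 0) for row in res]
def pvE (c : Nat) (res : List (List Int)) : List Int := res.map (fun row => row.getD c 0)

def pvShape (h w : Nat) (res : List (List Int)) : Prop :=
  res.length = h ∧ ∀ row ∈ res, row.length = w

theorem length_pvE (c : Nat) (res : List (List Int)) : (pvE c res).length = res.length :=
  List.length_map ..

theorem pvE_getD (c : Nat) (res : List (List Int)) (i : Nat) :
    (pvE c res).getD i 0 = (res.getD i []).getD c 0 := by
  by_cases hi : i < res.length
  · rw [List.getD_eq_getElem _ _ (by simpa [pvE] using hi), List.getD_eq_getElem _ _ hi]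
    simp [pvE]
  · rw [List.getD_eq_default _ _ (by simpa [pvE] using Nat.le_of_not_lt hi),
      List.getD_eq_default _ _ (Nat.le_of_not_lt hi)]
    simp

theorem set_zero_self (l : List Int) (c : Nat) (h : l.getD c 0 = 0) : l.set c 0 = l := by
  by_cases hc : c < l.length
  · rw [List.getD_eq_getElem _ _ hc] at h
    apply List.ext_getElem (by simp)
    intro i h1 h2
    rw [List.getElem_set]
    split_ifs with he
    · subst he; exact h.symm
    · rfl
  · exact List.set_eq_of_length_le (Nat.le_of_not_lt hc)

theorem getD_set_self {α : Type} (l : List α) (i : Nat) (d : α) : l.set i (l.getD i d) = l := by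
  by_cases hi : i < l.length
  · rw [List.getD_eq_getElem _ _ hi]
    exact List.set_getElem_self hi
  · exact List.set_eq_of_length_le (Nat.le_of_not_lt hi)

theorem pvSet2_oob {res : List (List Int)} {i : Nat} (hi : res.length ≤ i) (c : Nat) (v : Int) :
    pvSet2 res i c v = res := by
  unfold pvSet2; exact List.set_eq_of_length_le hi

theorem pvShape_pvSet2 {h w : Nat} {res : List (List Int)} (hsh : pvShape h w res)
    (i c : Nat) (v : Int) : pvShape h w (pvSet2 res i c v) := by
  obtain ⟨hl, hr⟩ := hsh
  by_cases hi : i < res.length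
  · refine ⟨by simpa [pvSet2] using hl, ?_⟩
    intro row hrow
    rcases List.mem_or_eq_of_mem_set hrow with hmem | heq
    · exact hr _ hmem
    · subst heq
      rw [List.length_set, List.getD_eq_getElem _ _ hi]
      exact hr _ (List.getElem_mem hi)
  · rw [pvSet2_oob (Nat.le_of_not_lt hi)]
    exact ⟨hl, hr⟩

theorem pvE_pvSet2_same {h w : Nat} {res : List (List Int)} (hsh : pvShape h w res)
    {i c : Nat} (hc : c < w) (hi : i < h) (v : Int) :
    pvE c (pvSet2 res i c v) = (pvE c res).set i v := by
  obtain ⟨hl, hr⟩ := hsh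
  have hi' : i < res.length := hl ▸ hi
  have hrow : (res.getD i []).length = w := by
    rw [List.getD_eq_getElem _ _ hi']
    exact hr _ (List.getElem_mem hi')
  unfold pvE pvSet2
  rw [List.map_set]
  congr 1
  rw [List.getD_eq_getElem _ _ (by rw [List.length_set, hrow]; exact hc)]
  rw [List.getElem_set]
  simp

theorem pvE_pvSet2_ne {res : List (List Int)} {c' c : Nat} (hne : c' ≠ c) (i : Nat) (v : Int) :
    pvE c' (pvSet2 res i c v) = pvE c' res := by
  by_cases hi : i < res.length
  · unfold pvE pvSet2
    rw [List.map_set]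
    have : ((res.getD i []).set c v).getD c' 0 = (res.getD i []).getD c' 0 := by
      by_cases hc' : c' < (res.getD i []).length
      · rw [List.getD_eq_getElem _ _ (by simpa using hc'), List.getD_eq_getElem _ _ hc',
          List.getElem_set, if_neg (fun hh => hne hh.symm)]
      · rw [List.getD_eq_default _ _ (by simpa using Nat.le_of_not_lt hc'),
          List.getD_eq_default _ _ (Nat.le_of_not_lt hc')]
    rw [this, ← pvE_getD c' res i]
    exact getD_set_self ..
  · rw [pvSet2_oob (Nat.le_of_not_lt hi)]
theorem append_replicate_getD_zero (P : List Int) (m i : Nat) (hP : P.length ≤ i) :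
    (P ++ List.replicate m (0 : Int)).getD i 0 = 0 := by
  by_cases hi : i < P.length + m
  · rw [List.getD_eq_getElem _ _ (by simpa using hi), List.getElem_append]
    split_ifs with h1
    · omega
    · exact List.getElem_replicate _
  · rw [List.getD_eq_default _ _ (by simpa using Nat.le_of_not_lt hi)]

-- filling zeros with zeros is a no-op
theorem pvFillA_zero_noop {c : Nat} {res : List (List Int)} {P : List Int} {m : Nat}
    (hcol : pvE c res = P ++ List.replicate m 0) :
    ∀ (n : Nat) (a b : Int), (b - a).toNat = n → (P.length : Int) ≤ a →
      pvFillA res c a b 0 = res := by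
  intro n
  induction n with
  | zero =>
      intro a b hn ha
      unfold pvFillA
      rw [PySem.List.pyRange_one_eq_nil (by omega)]
      rfl
  | succ k ih =>
      intro a b hn ha
      unfold pvFillA
      rw [PySem.List.pyRange_one_cons (by omega), List.foldl_cons]
      have hset : pvSet2 res a.toNat c 0 = res := by
        unfold pvSet2
        rw [set_zero_self _ _ (by
          rw [← pvE_getD, hcol]
          exact append_replicate_getD_zero _ _ _ (by omega))]
        exact getD_set_self ..
      rw [hset]
      exact ih (a + 1) b (by omega) (by omega)

-- the real fill: column c is P ++ zeros, fill [|P|, |P|+n) with v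
theorem pvFillA_spec {h w c : Nat} (hc : c < w) (v : Int) :
    ∀ (n : Nat) (res : List (List Int)) (P : List Int) (m : Nat),
      pvShape h w res → pvE c res = P ++ List.replicate m 0 → n ≤ m →
      pvE c (pvFillA res c (P.length : Int) ((P.length : Int) + n) v)
          = P ++ List.replicate n v ++ List.replicate (m - n) 0
      ∧ pvShape h w (pvFillA res c (P.length : Int) ((P.length : Int) + n) v)
      ∧ ∀ c', c' ≠ c → pvE c' (pvFillA res c (P.length : Int) ((P.length : Int) + n) v) = pvE c' res := by
  intro n
  induction n with
  | zero =>
      intro res P m hsh hcol hnm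
      unfold pvFillA
      rw [PySem.List.pyRange_one_eq_nil (by omega)]
      exact ⟨by simpa using hcol, hsh, fun _ _ => rfl⟩
  | succ k ih =>
      intro res P m hsh hcol hnm
      have hlen : P.length + m = h := by
        have h1 := length_pvE c res
        rw [hcol] at h1
        simp at h1
        have h2 := hsh.1
        omega
      have hm : 1 ≤ m := by omega
      -- first write: position |P|
      set res1 := pvSet2 res P.length c v with hres1
      have hsh1 : pvShape h w res1 := pvShape_pvSet2 hsh ..
      have hcol1 : pvE c res1 = (P ++ [v]) ++ List.replicate (m - 1) 0 := by
        rw [hres1, pvE_pvSet2_same hsh hc (by omega) v, hcol, List.set_append,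
          if_neg (by omega), List.append_assoc]
        congr 1
        simp only [Nat.sub_self]
        have hme : m = (m - 1) + 1 := by omega
        rw [hme, List.replicate_succ]
        simp
      have hstep : ∀ rr, pvFillA rr c (P.length : Int) ((P.length : Int) + (k+1)) v
          = pvFillA (pvSet2 rr P.length c v) c ((P.length : Int) + 1) ((P.length : Int) + (k+1)) v := by
        intro rr
        unfold pvFillA
        rw [PySem.List.pyRange_one_cons (by omega), List.foldl_cons]
        norm_num
      have hcast : ((P.length : Int) + 1) = (((P ++ [v]).length : Nat) : Int) := by push_cast; simp
      have := ih res1 (P ++ [v]) (m - 1) hsh1 hcol1 (by omega)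
      rw [show ((k+1 : Nat) : Int) = (k : Int) + 1 from by push_cast; ring, hstep, hcast,
        show ((P.length : Int) + ((k : Int) + 1)) = (((P ++ [v]).length : Nat) : Int) + (k : Nat) from by push_cast; simp; ring]
      refine ⟨?_, this.2.1, ?_⟩
      · rw [this.1]
        simp [List.replicate_succ]
        omega
      · intro c' hne
        rw [this.2.2 c' hne, hres1, pvE_pvSet2_ne hne]
theorem pvColB_eq_flatMap (ml : Int) (col : List Int) :
    pvColB ml col = (pvRuns col).flatMap (pvEmit ml) := by
  unfold pvColB
  rw [PySem.List.foldl_append_eq_flatMap]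
  simp

theorem length_pvEmit (ml : Int) (p : Int × Nat) : (pvEmit ml p).length = p.2 := by
  unfold pvEmit
  split_ifs <;> simp

theorem pvEmit_zero (ml : Int) (n : Nat) : pvEmit ml (0, n) = List.replicate n 0 := by
  unfold pvEmit
  simp

theorem length_pvColB (ml : Int) : ∀ col : List Int, (pvColB ml col).length = col.length := by
  intro col
  induction col using pvRuns.induct with
  | case1 => simp [pvColB, pvRuns]
  | case2 x t ih =>
      rw [pvColB_eq_flatMap] at *
      rw [pvRuns]
      simp only [List.flatMap_cons, List.length_append, length_pvEmit, ih]
      have := List.takeWhile_append_dropWhile (p := fun y => y == x) (l := t)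
      have hlen : (t.takeWhile (fun y => y == x)).length + (t.dropWhile (fun y => y == x)).length = t.length := by
        have h2 := congrArg List.length this
        rw [List.length_append] at h2
        exact h2
      simp only [List.length_cons]
      omega

theorem pvRuns_replicate (v : Int) (n : Nat) (hn : 1 ≤ n) :
    pvRuns (List.replicate n v) = [(v, n)] := by
  have hne : n = (n - 1) + 1 := by omega
  rw [hne, List.replicate_succ, pvRuns, List.takeWhile_replicate, List.dropWhile_replicate]
  simp [pvRuns]
  omega

theorem getLast?_append_right {α : Type} (l₁ l₂ : List α) (h : l₂ ≠ []) :
    (l₁ ++ l₂).getLast? = l₂.getLast? := by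
  rw [List.getLast?_append]
  cases he : l₂.getLast? with
  | none => exact absurd (List.getLast?_eq_none_iff.1 he) h
  | some a => rfl

theorem getLast?_dropWhile {α : Type} (p : α → Bool) (l : List α)
    (h : l.dropWhile p ≠ []) : (l.dropWhile p).getLast? = l.getLast? := by
  obtain ⟨pre, hpre⟩ := List.dropWhile_suffix (l := l) p
  conv_rhs => rw [← hpre]
  exact (getLast?_append_right _ _ h).symm

theorem pvRuns_append_replicate (v : Int) (n : Nat) (hn : 1 ≤ n) :
    ∀ P : List Int, (P = [] ∨ P.getLast? ≠ some v) →
      pvRuns (P ++ List.replicate n v) = pvRuns P ++ [(v, n)] := by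
  intro P
  induction P using pvRuns.induct with
  | case1 => intro _; simp [pvRuns_replicate v n hn, pvRuns]
  | case2 x t ih =>
      intro hb
      rcases hb with hb | hb
      · exact absurd hb (by simp)
      by_cases hall : ∀ y ∈ t, (y == x) = true
      · -- whole of P is one run of x; the replicate starts a new run (x ≠ v)
        have hx : (x :: t).getLast (by simp) = x := by
          rcases List.mem_cons.1 (List.getLast_mem (l := x :: t) (by simp)) with he | he
          · exact he
          · simpa using hall _ he
        have hlast : (x :: t).getLast? = some x := by
          rw [List.getLast?_eq_some_getLast (by simp), hx]
        have hxv : x ≠ v := fun he => hb (by rw [hlast, he])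
        have htw : t.takeWhile (fun y => y == x) = t := List.takeWhile_eq_self_iff.2 hall
        rw [List.cons_append, pvRuns, pvRuns]
        rw [List.takeWhile_append, List.dropWhile_append]
        rw [htw, if_pos rfl, List.dropWhile_eq_nil_iff.2 hall]
        rw [List.takeWhile_replicate]
        rw [if_neg (by simpa using Ne.symm hxv)]
        simp only [List.append_nil, pvRuns, htw]
        simp only [List.isEmpty_nil, if_true]
        rw [List.dropWhile_replicate, if_neg (by simpa using Ne.symm hxv),
          pvRuns_replicate v n hn]
        rfl
      · -- the run of x ends inside t
        push Not at hall
        have hdw : t.dropWhile (fun y => y == x) ≠ [] := by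
          intro he
          obtain ⟨y, hy, hyx⟩ := hall
          exact hyx (List.dropWhile_eq_nil_iff.1 he y hy)
        have hsum := congrArg List.length (List.takeWhile_append_dropWhile (p := fun y => y == x) (l := t))
        rw [List.length_append] at hsum
        have htw : (t.takeWhile (fun y => y == x)).length ≠ t.length := by
          have : 1 ≤ (t.dropWhile (fun y => y == x)).length := by
            cases hdd : t.dropWhile (fun y => y == x) with
            | nil => exact absurd hdd hdw
            | cons a l => simp
          omega
        have ht : t ≠ [] := by rintro rfl; obtain ⟨y, hy, _⟩ := hall; simp at hy
        rw [List.cons_append, pvRuns, pvRuns]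
        rw [List.takeWhile_append, List.dropWhile_append]
        rw [if_neg htw, if_neg (by simpa [List.isEmpty_iff] using hdw)]
        rw [ih (Or.inr (by
          rw [getLast?_dropWhile _ _ hdw]
          rw [show x :: t = [x] ++ t from rfl, getLast?_append_right _ _ ht] at hb
          exact hb))]
        simp
theorem pvColB_append_replicate (ml : Int) (v : Int) (n : Nat) (hn : 1 ≤ n)
    (P : List Int) (hb : P = [] ∨ P.getLast? ≠ some v) :
    pvColB ml (P ++ List.replicate n v) = pvColB ml P ++ pvEmit ml (v, n) := by
  rw [pvColB_eq_flatMap, pvColB_eq_flatMap, pvRuns_append_replicate v n hn P hb]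
  simp

theorem take_segment (cv : List Int) (k r : Nat) (p : Int)
    (hkr : k ≤ r) (hr : r ≤ cv.length)
    (hseg : ∀ j, k ≤ j → j < r → cv.getD j 0 = p) :
    cv.take r = cv.take k ++ List.replicate (r - k) p := by
  apply List.ext_getElem (by simp; omega)
  intro i h1 h2
  rw [List.getElem_take, List.getElem_append]
  split_ifs with hik
  · rw [List.getElem_take]
  · rw [List.getElem_replicate]
    have hik' : k ≤ i := by simp at hik; omega
    have hir : i < r := (by simpa using h1 : i < r ∧ i < cv.length).1
    rw [← List.getD_eq_getElem cv 0 (by omega)]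
    exact hseg i hik' hir

theorem getLast?_take (cv : List Int) (k : Nat) (hk : 0 < k) (hkl : k ≤ cv.length) :
    (cv.take k).getLast? = some (cv.getD (k - 1) 0) := by
  rw [List.getLast?_eq_getElem?, List.length_take]
  have hm : min k cv.length = k := by omega
  rw [hm, List.getElem?_take_of_lt (by omega), List.getElem?_eq_getElem (by omega),
    List.getD_eq_getElem cv 0 (by omega)]
-- completing a run: fill (or skip) turns 'emitted prefix + zeros' into a longer emitted prefix
theorem fill_run {h w c : Nat} (hc : c < w) (ml : Int) (cv : List Int)
    (res : List (List Int)) (k n : Nat) (prev : Int) (hn : 1 ≤ n)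
    (hsh : pvShape h w res)
    (hcol : pvE c res = pvColB ml (cv.take k) ++ List.replicate (h - k) 0)
    (hkn : k + n ≤ h) (hcv : cv.length = h)
    (hseg : ∀ j, k ≤ j → j < k + n → cv.getD j 0 = prev)
    (hprev : prev ≠ 0)
    (hbound : k = 0 ∨ cv.getD (k-1) 0 ≠ prev) :
    (pvE c (if ml ≤ ((n : Nat) : Int) then pvFillA res c (k : Int) ((k : Int) + (n : Nat)) prev else res)
        = pvColB ml (cv.take (k + n)) ++ List.replicate (h - (k + n)) 0)
    ∧ pvShape h w (if ml ≤ ((n : Nat) : Int) then pvFillA res c (k : Int) ((k : Int) + (n : Nat)) prev else res)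
    ∧ ∀ c', c' ≠ c → pvE c' (if ml ≤ ((n : Nat) : Int) then pvFillA res c (k : Int) ((k : Int) + (n : Nat)) prev else res) = pvE c' res := by
  have hPlen : (pvColB ml (cv.take k)).length = k := by
    rw [length_pvColB]; simp; omega
  have htake : cv.take (k + n) = cv.take k ++ List.replicate n prev :=
    by simpa using take_segment cv k (k + n) prev (by omega) (by omega) hseg
  have hbd : cv.take k = [] ∨ (cv.take k).getLast? ≠ some prev := by
    rcases Nat.eq_zero_or_pos k with h0 | hpos
    · left; simp [h0]
    · rcases hbound with h0 | hne
      · exact absurd h0 (by omega)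
      · right
        rw [getLast?_take cv k hpos (by omega)]
        exact fun hh => hne (by injection hh)
  have hColB : pvColB ml (cv.take (k + n)) = pvColB ml (cv.take k) ++ pvEmit ml (prev, n) := by
    rw [htake]
    exact pvColB_append_replicate ml prev n hn _ hbd
  by_cases hml : ml ≤ ((n : Nat) : Int)
  · rw [if_pos hml]
    have harg1 : (k : Int) = ((pvColB ml (cv.take k)).length : Int) := by rw [hPlen]
    rw [harg1]
    have := pvFillA_spec (h := h) (w := w) hc prev n res (pvColB ml (cv.take k)) (h - k) hsh hcol (by omega)
    refine ⟨?_, this.2.1, this.2.2⟩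
    rw [this.1, hColB]
    unfold pvEmit
    rw [if_pos ⟨hprev, hml⟩]
    simp [List.append_assoc]
    omega
  · rw [if_neg hml]
    refine ⟨?_, hsh, fun _ _ => rfl⟩
    rw [hcol, hColB]
    unfold pvEmit
    rw [if_neg (fun hco => hml hco.2)]
    rw [List.append_assoc, ← List.replicate_add]
    congr 2
    omega
-- the state of A's inner row loop before processing row r (1 ≤ r ≤ h):
-- k = start of the pending run, column c of the result = emitted prefix + zeros
def pvInv (grid : List (List Int)) (ml : Int) (c h w : Nat) (res0 : List (List Int))
    (r : Nat) (st : List (List Int) × Int × Int) : Prop :=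
  ∃ k : Nat, k < r ∧
    st.2.2 = (pvE c grid).getD (r-1) 0 ∧
    (∀ j, k ≤ j → j < r → (pvE c grid).getD j 0 = st.2.2) ∧
    (k = 0 ∨ (pvE c grid).getD (k-1) 0 ≠ st.2.2) ∧
    (st.2.2 = 0 → st.2.1 = 1) ∧ (st.2.2 ≠ 0 → st.2.1 = (r : Int) - (k : Int)) ∧
    pvE c st.1 = pvColB ml ((pvE c grid).take k) ++ List.replicate (h - k) 0 ∧
    pvShape h w st.1 ∧ (∀ c', c' ≠ c → pvE c' st.1 = pvE c' res0)

theorem pvInv_step (grid : List (List Int)) (ml : Int) (c h w : Nat)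
    (hc : c < w) (hh : grid.length = h)
    (res0 : List (List Int)) (r : Nat) (st : List (List Int) × Int × Int)
    (hr1 : 1 ≤ r) (hrh : r < h) (hinv : pvInv grid ml c h w res0 r st) :
    pvInv grid ml c h w res0 (r+1) (pvStepA grid ml c st (r : Int)) := by
  obtain ⟨k, hkr, hprev, hseg, hbound, hs0, hs1, hcol, hsh, hoth⟩ := hinv
  obtain ⟨res1, streak, prev⟩ := st
  simp only at hprev hseg hbound hs0 hs1 hcol hsh hoth
  have hcv : (pvE c grid).length = h := by rw [length_pvE, hh]
  have hcur : (grid.getD ((r : Int)).toNat []).getD c 0 = (pvE c grid).getD r 0 := by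
    rw [pvE_getD]; simp
  unfold pvStepA
  simp only [hcur]
  by_cases hext : (pvE c grid).getD r 0 = prev ∧ prev ≠ 0
  · -- streak extends
    rw [if_pos hext]
    refine ⟨k, by omega, by simpa using hext.1.symm, ?_, ?_, ?_, ?_, hcol, hsh, hoth⟩
    · intro j hkj hjr
      rcases Nat.lt_or_ge j r with hj | hj
      · exact hseg j hkj hj
      · have : j = r := by omega
        subst this; exact hext.1
    · simpa using hbound
    · intro h0; exact absurd h0 (by simpa using hext.2)
    · intro _
      have := hs1 hext.2
      simp only [this]
      push_cast
      ring
  · -- reset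
    rw [if_neg hext]
    by_cases hp0 : prev = 0
    · -- pending run is a zero run: streak = 1, the fill (if any) writes 0 over zeros
      have hstreak : streak = 1 := hs0 hp0
      have hnoop : (if ml ≤ streak then pvFillA res1 c ((r : Int) - streak) (r : Int) prev else res1) = res1 := by
        subst hp0
        split_ifs with hml
        · exact pvFillA_zero_noop hcol ((r : Int) - ((r : Int) - streak)).toNat
            ((r : Int) - streak) (r : Int) rfl (by
              rw [length_pvColB]
              simp
              omega)
        · rfl
      rw [hnoop]
      by_cases hc0 : (pvE c grid).getD r 0 = 0
      · -- zero run continues: same k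
        refine ⟨k, by omega, by simp, ?_, ?_, fun _ => rfl, fun hne => absurd hc0 (by simpa using hne), hcol, hsh, hoth⟩
        · intro j hkj hjr
          simp only [hc0]
          rcases Nat.lt_or_ge j r with hj | hj
          · rw [hseg j hkj hj, hp0]
          · have : j = r := by omega
            subst this; exact hc0
        · simp only [hc0]
          rcases hbound with h0 | hne
          · exact Or.inl h0
          · exact Or.inr (hp0 ▸ hne)
      · -- a nonzero run starts at r
        refine ⟨r, by omega, by simp, ?_, ?_, fun h0 => rfl, fun _ => by push_cast; ring, ?_, hsh, hoth⟩
        · intro j hkj hjr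
          have : j = r := by omega
          subst this; simp
        · right
          have : (pvE c grid).getD (r-1) 0 = prev := hseg (r-1) (by omega) (by omega)
          rw [this, hp0]
          simpa using fun hh => hc0 hh.symm
        · rw [hcol]
          have htake : (pvE c grid).take r = (pvE c grid).take k ++ List.replicate (r - k) 0 := by
            have := take_segment (pvE c grid) k r 0 (by omega) (by omega)
              (fun j hkj hjr => by rw [hseg j hkj hjr, hp0])
            simpa using this
          have hbd : (pvE c grid).take k = [] ∨ ((pvE c grid).take k).getLast? ≠ some 0 := by
            rcases Nat.eq_zero_or_pos k with h0 | hpos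
            · left; simp [h0]
            · rcases hbound with h0 | hne
              · exact absurd h0 (by omega)
              · right
                rw [getLast?_take _ k hpos (by omega)]
                rw [hp0] at hne
                exact fun hh => hne (by injection hh)
          rw [htake, pvColB_append_replicate ml 0 (r-k) (by omega) _ hbd, pvEmit_zero]
          rw [List.append_assoc, ← List.replicate_add]
          congr 2
          omega
    · -- pending run is nonzero and ends here: emit it via fill_run
      have hcne : (pvE c grid).getD r 0 ≠ prev := fun hh => hext ⟨hh, hp0⟩
      have hstreak : streak = (r : Int) - (k : Int) := hs1 hp0
      have hn1 : 1 ≤ r - k := by omega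
      have harg1 : (r : Int) - streak = (k : Int) := by rw [hstreak]; ring
      have harg2 : (r : Int) = (k : Int) + ((r - k : Nat) : Int) := by push_cast; omega
      have hmlarg : (ml ≤ streak) ↔ (ml ≤ ((r - k : Nat) : Int)) := by
        rw [hstreak]
        constructor <;> intro hx <;> [skip; skip] <;> push_cast at * <;> omega
      have hfr := fill_run (h := h) hc ml (pvE c grid) res1 k (r - k) prev hn1 hsh hcol
        (by omega) hcv (fun j hkj hjr => hseg j hkj (by omega)) hp0 hbound
      rw [harg1, harg2]
      simp only [hmlarg]
      have hkrn : k + (r - k) = r := by omega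
      rw [hkrn] at hfr
      refine ⟨r, by omega, by simp, ?_, ?_, fun _ => rfl, fun _ => by push_cast; ring, hfr.1, hfr.2.1, ?_⟩
      · intro j hkj hjr
        have : j = r := by omega
        subst this; simp
      · right
        have : (pvE c grid).getD (r-1) 0 = prev := hseg (r-1) (by omega) (by omega)
        rw [this]
        simpa using fun hh => hcne hh.symm
      · intro c' hne
        rw [hfr.2.2 c' hne, hoth c' hne]
theorem pvInv_loop (grid : List (List Int)) (ml : Int) (c h w : Nat)
    (hc : c < w) (hh : grid.length = h) (res0 : List (List Int))
    (hsh0 : pvShape h w res0)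
    (hcol0 : pvE c res0 = List.replicate h 0)
    (hhd : (grid.headD []).getD c 0 = (pvE c grid).getD 0 0) :
    ∀ r : Nat, 1 ≤ r → r ≤ h →
      pvInv grid ml c h w res0 r
        ((PySem.List.pyRange 1 (r : Int) 1).foldl (pvStepA grid ml c) (res0, 1, (grid.headD []).getD c 0)) := by
  intro r hr
  induction r, hr using Nat.le_induction with
  | base =>
      intro h1h
      rw [PySem.List.pyRange_one_eq_nil (by omega)]
      refine ⟨0, by omega, by simpa using hhd, ?_, Or.inl rfl, fun _ => rfl, fun _ => by norm_num, ?_, hsh0, fun _ _ => rfl⟩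
      · intro j h0j hj1
        have : j = 0 := by omega
        subst this
        simpa using hhd.symm
      · simpa [pvColB, pvRuns] using hcol0
  | succ r hr ih =>
      intro hrh
      have hstep : PySem.List.pyRange 1 ((r+1 : Nat) : Int) 1
          = PySem.List.pyRange 1 (r : Int) 1 ++ [(r : Int)] := by
        rw [show ((r+1 : Nat) : Int) = (r : Int) + 1 from by push_cast; ring]
        exact PySem.List.pyRange_one_succ_right (by omega)
      rw [hstep, List.foldl_append, List.foldl_cons, List.foldl_nil]
      exact pvInv_step grid ml c h w hc hh res0 r _ hr (by omega) (ih (by omega))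

-- one full column pass of A: column c becomes B's column, everything else untouched
theorem pvColA_spec (grid : List (List Int)) (ml : Int) (c h w : Nat)
    (hc : c < w) (hh : grid.length = h) (h1 : 1 ≤ h) (res0 : List (List Int))
    (hsh0 : pvShape h w res0)
    (hcol0 : pvE c res0 = List.replicate h 0) :
    pvE c (pvColA grid ml (h : Int) res0 c) = pvColB ml (pvE c grid)
    ∧ pvShape h w (pvColA grid ml (h : Int) res0 c)
    ∧ ∀ c', c' ≠ c → pvE c' (pvColA grid ml (h : Int) res0 c) = pvE c' res0 := by
  have hgne : grid ≠ [] := by intro he; rw [he] at hh; simp at hh; omega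
  have hhd : (grid.headD []).getD c 0 = (pvE c grid).getD 0 0 := by
    cases grid with
    | nil => exact absurd rfl hgne
    | cons a l => simp [pvE]
  have hcv : (pvE c grid).length = h := by rw [length_pvE, hh]
  set st := (PySem.List.pyRange 1 (h : Int) 1).foldl (pvStepA grid ml c) (res0, 1, (grid.headD []).getD c 0) with hst
  have hinv := pvInv_loop grid ml c h w hc hh res0 hsh0 hcol0 hhd h h1 le_rfl
  rw [← hst] at hinv
  obtain ⟨k, hkh, hprev, hseg, hbound, hs0, hs1, hcol, hsh, hoth⟩ := hinv
  rw [show pvColA grid ml (h : Int) res0 c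
      = (if ml ≤ st.2.1 then pvFillA st.1 c ((h : Int) - st.2.1) (h : Int) st.2.2 else st.1) from rfl]
  by_cases hp0 : st.2.2 = 0
  · -- trailing zero run: final fill (if any) is a no-op
    have hstreak : st.2.1 = 1 := hs0 hp0
    have hnoop : (if ml ≤ st.2.1 then pvFillA st.1 c ((h : Int) - st.2.1) (h : Int) st.2.2 else st.1) = st.1 := by
      split_ifs with hml
      · rw [hp0]
        exact pvFillA_zero_noop hcol ((h : Int) - ((h : Int) - st.2.1)).toNat
          ((h : Int) - st.2.1) (h : Int) rfl (by
            rw [length_pvColB]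
            simp
            omega)
      · rfl
    rw [hnoop]
    refine ⟨?_, hsh, hoth⟩
    rw [hcol]
    have htake : (pvE c grid).take h = (pvE c grid).take k ++ List.replicate (h - k) 0 := by
      have := take_segment (pvE c grid) k h 0 (by omega) (by omega)
        (fun j hkj hjr => by rw [hseg j hkj hjr, hp0])
      simpa using this
    have hbd : (pvE c grid).take k = [] ∨ ((pvE c grid).take k).getLast? ≠ some 0 := by
      rcases Nat.eq_zero_or_pos k with h0 | hpos
      · left; simp [h0]
      · rcases hbound with h0 | hne
        · exact absurd h0 (by omega)
        · right
          rw [getLast?_take _ k hpos (by omega)]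
          rw [hp0] at hne
          exact fun hh => hne (by injection hh)
    have : (pvE c grid).take h = pvE c grid := by rw [← hcv, List.take_length]
    conv_rhs => rw [← this, htake]
    rw [pvColB_append_replicate ml 0 (h-k) (by omega) _ hbd, pvEmit_zero]
  · -- trailing nonzero run: emit it via fill_run
    have hstreak : st.2.1 = (h : Int) - (k : Int) := hs1 hp0
    have hn1 : 1 ≤ h - k := by omega
    have harg1 : (h : Int) - st.2.1 = (k : Int) := by rw [hstreak]; ring
    have harg2 : (h : Int) = (k : Int) + ((h - k : Nat) : Int) := by push_cast; omega
    have hmlarg : (ml ≤ st.2.1) ↔ (ml ≤ ((h - k : Nat) : Int)) := by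
      rw [hstreak]
      constructor <;> intro hx <;> push_cast at * <;> omega
    have hfr := fill_run (h := h) hc ml (pvE c grid) st.1 k (h - k) st.2.2 hn1 hsh hcol
      (by omega) hcv (fun j hkj hjr => hseg j hkj (by omega)) hp0 hbound
    rw [harg1, harg2]
    simp only [hmlarg]
    have hkrn : k + (h - k) = h := by omega
    rw [hkrn] at hfr
    have : (pvE c grid).take h = pvE c grid := by rw [← hcv, List.take_length]
    rw [this] at hfr
    refine ⟨by rw [hfr.1]; simp, hfr.2.1, fun c' hne => by rw [hfr.2.2 c' hne, hoth c' hne]⟩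
theorem pvCols_loop (grid : List (List Int)) (ml : Int) (h w : Nat)
    (hh : grid.length = h) (h1 : 1 ≤ h) :
    ∀ cidx : Nat, cidx ≤ w →
      pvShape h w ((PySem.List.pyRange 0 (cidx : Int) 1).foldl
          (fun res cc => pvColA grid ml (h : Int) res cc.toNat)
          (List.replicate h (List.replicate w 0)))
      ∧ ∀ c' : Nat, c' < w →
          pvE c' ((PySem.List.pyRange 0 (cidx : Int) 1).foldl
              (fun res cc => pvColA grid ml (h : Int) res cc.toNat)
              (List.replicate h (List.replicate w 0)))
            = if c' < cidx then pvColB ml (pvE c' grid) else List.replicate h 0 := by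
  intro cidx
  induction cidx with
  | zero =>
      intro _
      rw [show ((0 : Nat) : Int) = 0 from rfl, PySem.List.pyRange_one_eq_nil (by omega), List.foldl_nil]
      refine ⟨⟨by simp, ?_⟩, ?_⟩
      · intro row hrow
        rw [List.eq_of_mem_replicate hrow]
        simp
      · intro c' _
        rw [if_neg (by omega)]
        simp [pvE]
  | succ cidx ih =>
      intro hcw
      have hstep : PySem.List.pyRange 0 ((cidx+1 : Nat) : Int) 1
          = PySem.List.pyRange 0 (cidx : Int) 1 ++ [(cidx : Int)] := by
        rw [show ((cidx+1 : Nat) : Int) = (cidx : Int) + 1 from by push_cast; ring]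
        exact PySem.List.pyRange_one_succ_right (by omega)
      rw [hstep, List.foldl_append, List.foldl_cons, List.foldl_nil]
      obtain ⟨hsh, hcols⟩ := ih (by omega)
      rw [show ((cidx : Int)).toNat = cidx from by simp]
      have hspec := pvColA_spec grid ml cidx h w (by omega) hh h1 _ hsh
        (by rw [hcols cidx (by omega), if_neg (by omega)])
      refine ⟨hspec.2.1, ?_⟩
      intro c' hc'
      by_cases hceq : c' = cidx
      · subst hceq
        rw [hspec.1, if_pos (by omega)]
      · rw [hspec.2.2 c' hceq, hcols c' hc']
        by_cases hlt : c' < cidx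
        · rw [if_pos hlt, if_pos (by omega)]
        · rw [if_neg hlt, if_neg (by omega)]
-- ===== VERDICT (by name: the statement is the Claim_ definition above) =====
theorem detect_vertical_lines_spec : Claim_equal_detect_vertical_lines := by
  intro grid ml _ _
  unfold Spec_detect_vertical_lines
  by_cases hg : grid = []
  · unfold detect_vertical_lines detect_vertical_lines_alt
    rw [if_pos hg, if_pos hg]
  · unfold detect_vertical_lines detect_vertical_lines_alt
    rw [if_neg hg, if_neg hg]
    have h1 : 1 ≤ grid.length := by
      cases grid with
      | nil => exact absurd rfl hg
      | cons a l => simp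
    set h : Nat := grid.length with hhdef
    set w : Nat := (grid.headD []).length with hwdef
    obtain ⟨⟨hlenA, hrows⟩, hcols⟩ := pvCols_loop grid ml h w hhdef.symm h1 w le_rfl
    set A := (PySem.List.pyRange 0 (w : Int) 1).foldl
        (fun res cc => pvColA grid ml (h : Int) res cc.toNat)
        (List.replicate h (List.replicate w 0)) with hA
    apply List.ext_getElem
    · simp [hlenA]
    · intro r hr1 hr2
      rw [List.getElem_map, List.getElem_range]
      apply List.ext_getElem
      · rw [List.length_map, List.length_range]
        exact hrows _ (List.getElem_mem _)
      · intro c hc1 hc2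
        have hcw : c < w := by
          have := hrows _ (List.getElem_mem hr1)
          omega
        have hrh : r < h := by omega
        rw [List.getElem_map, List.getElem_range]
        have hEA := hcols c hcw
        rw [if_pos hcw] at hEA
        have hcolsc : ((List.range w).map
            (fun c => pvColB ml (grid.map (fun row => row.getD c 0)))).getD c []
            = pvColB ml (pvE c grid) := by
          rw [List.getD_eq_getElem _ _ (by simpa using hcw), List.getElem_map, List.getElem_range]
          rfl
        rw [hcolsc]
        have hlenB : (pvColB ml (pvE c grid)).length = h := by
          rw [length_pvColB, length_pvE, hhdef]
        rw [List.getD_eq_getElem _ _ (by omega)]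
        rw [show (A[r]'hr1)[c]'hc1 = (pvE c A).getD r 0 from by
          rw [pvE_getD c A r, List.getD_eq_getElem A [] hr1, List.getD_eq_getElem _ _ hc1]]
        rw [hEA, List.getD_eq_getElem _ _ (by omega)]
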